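-- pv_equiv track=rewrite | github.com/bryant/purpledefrag | utils.py | count_and_remove_keyword
-- ===== SOURCE A (Python) =====
-- def count_and_remove_keyword(args, keyword):
--     newargs = []
--     count = 0
--     for arg in args:
--         if arg == keyword:
--             count += 1
--         else:
--             newargs.append(arg)
--     return count, newargs
-- ===== SOURCE B (Python) =====
-- def count_and_remove_keyword(args, keyword):
--     count = args.count(keyword)
--     newargs = list(args)
--     for _ in range(count):
--         newargs.remove(keyword)
--     return count, newargs
-- ===== Notes on version B (the rewrite author's own statement) =====
-- stated objective: alternative
-- what changed: Replaces A's single fused counter-plus-append loop by two staged library passes: the count comes from list.count, and the occurrences are deleted by calling list.remove that many times on a copy; no element-wise loop or running counter of its own.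
import Mathlib
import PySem

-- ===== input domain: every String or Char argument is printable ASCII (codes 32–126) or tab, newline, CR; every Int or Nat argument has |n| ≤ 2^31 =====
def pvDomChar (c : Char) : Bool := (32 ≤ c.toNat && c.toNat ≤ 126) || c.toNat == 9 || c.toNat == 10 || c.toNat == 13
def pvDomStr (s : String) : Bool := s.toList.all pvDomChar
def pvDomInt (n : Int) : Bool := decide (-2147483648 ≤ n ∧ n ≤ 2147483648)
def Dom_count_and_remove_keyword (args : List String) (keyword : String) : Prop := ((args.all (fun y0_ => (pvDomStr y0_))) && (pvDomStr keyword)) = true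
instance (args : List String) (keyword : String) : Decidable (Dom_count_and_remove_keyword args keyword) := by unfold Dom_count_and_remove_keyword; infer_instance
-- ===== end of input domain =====

-- B replaces A's fused counter+append loop by two staged library passes: list.count for the count,
-- then that many list.remove calls on a copy (alternative decomposition, same return value).

-- ===== PORT A =====
-- literal port of A: one fold carrying (count, newargs), appending at the back as Python's .append does
def count_and_remove_keyword (args : List String) (keyword : String) : Int × List String :=
  let st := args.foldl
    (fun (st : Int × List String) arg =>
      if arg == keyword then (st.1 + 1, st.2) else (st.1, st.2 ++ [arg]))
    (0, [])
  (st.1, st.2)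

-- ===== PORT B =====
-- B's 'for _ in range(count): newargs.remove(keyword)' loop; getD only totalises remove?
-- (the removal always succeeds since the loop runs exactly count times)
def carkw_removeLoop (keyword : String) : Nat → List String → List String
  | 0, l => l
  | n + 1, l => carkw_removeLoop keyword n ((PySem.List.remove? l keyword).getD l)

-- literal port of B: count = args.count(keyword); copy; remove keyword count times
def count_and_remove_keyword_alt (args : List String) (keyword : String) : Int × List String :=
  let count := PySem.List.count args keyword
  let newargs := carkw_removeLoop keyword count args
  ((count : Int), newargs)

-- ===== PRECONDITION & SPEC =====
def Spec_count_and_remove_keyword (args : List String) (keyword : String) (out : Int × List String) : Prop := out = count_and_remove_keyword_alt args keyword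
instance (args : List String) (keyword : String) (out : Int × List String) : Decidable (Spec_count_and_remove_keyword args keyword out) := by unfold Spec_count_and_remove_keyword; infer_instance

-- ===== CLAIM (what is proved, stated in full; the proofs are below) =====
def Claim_equal_count_and_remove_keyword : Prop := ∀ (args : List String) (keyword : String), Dom_count_and_remove_keyword args keyword → Spec_count_and_remove_keyword args keyword (count_and_remove_keyword args keyword)

-- ===== LEMMAS AND PROOFS =====

-- loop invariant for A's fold: starting from any accumulator (c, acc),
-- the fold yields (c + #matches, acc ++ filter)
theorem carkw_foldl_inv (keyword : String) (args : List String) (c : Int) (acc : List String) :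
    args.foldl
      (fun (st : Int × List String) arg =>
        if arg == keyword then (st.1 + 1, st.2) else (st.1, st.2 ++ [arg]))
      (c, acc)
    = (c + (args.count keyword : Int),
       acc ++ args.filter (fun a => a != keyword)) := by
  induction args generalizing c acc with
  | nil => simp
  | cons x xs ih =>
    simp only [List.foldl_cons]
    by_cases h : x = keyword
    · rw [if_pos (by simp [h]), ih]
      simp [List.count_cons, h]
      ring
    · rw [if_neg (by simp [h]), ih]
      simp [List.filter_cons, h]

-- the remove loop commutes with a non-matching head while removals still succeed
theorem carkw_removeLoop_cons_ne (keyword x : String) (hx : x ≠ keyword) :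
    ∀ (n : Nat) (xs : List String), n ≤ xs.count keyword →
      carkw_removeLoop keyword n (x :: xs) = x :: carkw_removeLoop keyword n xs := by
  intro n
  induction n with
  | zero => intro xs _; rfl
  | succ m ih =>
    intro xs hn
    have hmem : keyword ∈ xs := by
      by_contra hmem
      simp [List.count_eq_zero_of_not_mem hmem] at hn
    have hrem : PySem.List.remove? xs keyword = some (xs.erase keyword) :=
      PySem.List.remove?_eq_some_erase xs keyword hmem
    have hrem2 : PySem.List.remove? (x :: xs) keyword
        = some (x :: xs.erase keyword) := by
      rw [PySem.List.remove?_cons_of_ne xs hx, hrem]; rfl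
    have hcount : m ≤ (xs.erase keyword).count keyword := by
      rw [List.count_erase_self]
      omega
    simp only [carkw_removeLoop, hrem, hrem2, Option.getD_some]
    exact ih (xs.erase keyword) hcount

-- removing exactly count occurrences is filtering them out
theorem carkw_removeLoop_count (keyword : String) :
    ∀ (l : List String),
      carkw_removeLoop keyword (l.count keyword) l
        = l.filter (fun a => a != keyword) := by
  intro l
  induction l with
  | nil => rfl
  | cons x xs ih =>
    by_cases h : x = keyword
    · subst h
      have : (x :: xs).count x = xs.count x + 1 := by simp
      rw [this]
      simp only [carkw_removeLoop, PySem.List.remove?_cons_self, Option.getD_some]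
      rw [ih]
      simp
    · have hc : (x :: xs).count keyword = xs.count keyword := by
        simp [h]
      rw [hc, carkw_removeLoop_cons_ne keyword x h _ xs le_rfl, ih]
      simp [h]

-- ===== VERDICT (by name: the statement is the Claim_ definition above) =====
theorem count_and_remove_keyword_spec : Claim_equal_count_and_remove_keyword := by
  intro args keyword _
  unfold Spec_count_and_remove_keyword
  simp only [count_and_remove_keyword, count_and_remove_keyword_alt,
    PySem.List.count_eq]
  rw [carkw_foldl_inv, carkw_removeLoop_count]
  simp
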